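-- pv_equiv track=rewrite | github.com/faresur/aoc | 2023/day05/day05-unoptimized.py | generate_maps
-- ===== SOURCE A (Python) =====
-- def generate_maps(almanac: list[str]) -> list[set[tuple[int]]]:
--     maps: list[set[tuple[int]]] = []
--     current_map: set[tuple[int]] = set()
--     for line in almanac[2:]:
--         if not line:
--             maps.append(current_map)
--             current_map = set()
--             continue
--         if line[-4:] == "map:":
--             continue
--         map_rule: tuple[int] = tuple(map(int, line.split()))
--         current_map.add(map_rule)
--     maps.append(current_map)
--     return maps
-- ===== SOURCE B (Python) =====
-- def generate_maps(almanac: list[str]) -> list[set[tuple[int]]]: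
--     # group-then-parse: split the lines into blank-separated blocks first,
--     # then parse each block into a set of rules
--     blocks: list[list[str]] = []
--     rest = almanac[2:]
--     while True:
--         try:
--             i = rest.index("")
--         except ValueError:
--             blocks.append(rest)
--             break
--         blocks.append(rest[:i])
--         rest = rest[i + 1:]
--     return [{tuple(map(int, line.split()))
--              for line in block if not line.endswith("map:")}
--             for block in blocks]
-- ===== Notes on version B (the rewrite author's own statement) =====
-- stated objective: alternative
-- what changed: Replaces A's single-pass state machine (running current set, flushed on each blank line) by a two-stage pass: first split almanac[2:] into blank-separated blocks (preserving empty blocks) via repeated list.index, then parse each block independently into its rule set.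
import Mathlib
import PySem

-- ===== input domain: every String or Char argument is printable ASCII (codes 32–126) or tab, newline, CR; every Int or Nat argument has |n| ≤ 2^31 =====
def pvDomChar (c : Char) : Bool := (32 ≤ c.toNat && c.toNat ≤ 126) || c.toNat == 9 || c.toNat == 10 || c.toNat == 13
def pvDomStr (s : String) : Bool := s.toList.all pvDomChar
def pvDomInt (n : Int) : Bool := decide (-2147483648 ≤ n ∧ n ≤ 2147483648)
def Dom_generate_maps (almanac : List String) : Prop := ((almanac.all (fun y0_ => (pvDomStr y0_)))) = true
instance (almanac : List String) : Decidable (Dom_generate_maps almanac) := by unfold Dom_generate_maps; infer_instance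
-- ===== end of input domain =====

-- B replaces A's running-accumulator state machine by a two-stage group-then-parse pass (alternative decomposition, same cost).


-- ===== PORT A =====
-- tuple(map(int, line.split())); int() never hits the getD 0 default on inputs admitted by Pre_
def pvParseRule (line : String) : List Int :=
  (PySem.Str.split₀ line).map (fun t => (PySem.Int.ofStr? t).getD 0)

-- one iteration of A's for-loop over the state (maps, current_map)
def pvStepA (st : List (List (List Int)) × PySem.Set (List Int)) (line : String) :
    List (List (List Int)) × PySem.Set (List Int) :=
  if line = "" then (st.1 ++ [st.2], PySem.Set.empty)
  else if PySem.Str.slice line (some (-4)) none = "map:" then st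
  else (st.1, PySem.Set.add st.2 (pvParseRule line))

def generate_maps (almanac : List String) : List (List (List Int)) :=
  let st := (PySem.List.slice almanac (some 2) none).foldl pvStepA ([], PySem.Set.empty)
  st.1 ++ [st.2]

-- ===== PORT B =====
-- B's while loop: split off the segment before the first "" (rest.index("")), repeat on the remainder
def pvSplitBlocks (lines : List String) : List (List String) :=
  match h : PySem.List.index? lines "" with
  | none => [lines]
  | some j => lines.take j :: pvSplitBlocks (lines.drop (j + 1))
termination_by lines.length
decreasing_by
  obtain ⟨hk, _⟩ := PySem.List.getElem_of_index?_eq_some h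
  simp only [List.length_drop]; omega

-- the set comprehension over one block
def pvRules (b : List String) : List (List Int) :=
  (b.filter (fun l => !PySem.Str.endswith l "map:")).map pvParseRule

def pvParseBlock (b : List String) : List (List Int) :=
  PySem.Set.ofList (pvRules b)

def generate_maps_alt (almanac : List String) : List (List (List Int)) :=
  (pvSplitBlocks (PySem.List.slice almanac (some 2) none)).map pvParseBlock

-- ===== PRECONDITION & SPEC =====
-- Pre_ excludes exactly the inputs where A's int() raises ValueError: a non-blank,
-- non-header line of almanac[2:] with a token that is not an integer literal.
def Pre_generate_maps (almanac : List String) : Prop :=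
  ∀ line ∈ PySem.List.slice almanac (some 2) none, line ≠ "" →
    PySem.Str.endswith line "map:" = false →
    ∀ t ∈ PySem.Str.split₀ line, (PySem.Int.ofStr? t).isSome = true
instance (almanac : List String) : Decidable (Pre_generate_maps almanac) := by
  unfold Pre_generate_maps; infer_instance

def pvWitness_generate_maps : List String :=
  ["seeds: 79 14", "", "seed-to-soil map:", "50 98 2", "52 50 48", "", "soil map:", "0 15 37"]

def Spec_generate_maps (almanac : List String) (out : List (List (List Int))) : Prop := out = generate_maps_alt almanac
instance (almanac : List String) (out : List (List (List Int))) : Decidable (Spec_generate_maps almanac out) := by unfold Spec_generate_maps; infer_instance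

-- ===== CLAIM (what is proved, stated in full; the proofs are below) =====
def Claim_equal_generate_maps : Prop := ∀ (almanac : List String), Dom_generate_maps almanac → Pre_generate_maps almanac → Spec_generate_maps almanac (generate_maps almanac)

-- ===== LEMMAS AND PROOFS =====

-- a list is a suffix iff it is the drop that leaves its own length
theorem pvSuffixDrop (l p : List Char) : p <:+ l ↔ p = l.drop (l.length - p.length) := by
  constructor
  · rintro ⟨pre, rfl⟩
    simp [List.drop_left']
  · intro h
    rw [h]
    exact List.drop_suffix _ _

-- A's test line[-4:] == "map:" is exactly line.endswith("map:")
theorem pvSliceCond (s : String) :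
    (PySem.Str.slice s (some (-4)) none = "map:") ↔ (PySem.Str.endswith s "map:" = true) := by
  rw [PySem.Str.endswith_eq, PySem.Chars.endswith_iff, pvSuffixDrop]
  unfold PySem.Str.slice PySem.Chars.slice
  rw [PySem.List.slice_from_neg_ofNat _ 4 (by omega)]
  have hlen : ("map:" : String).toList.length = 4 := by decide
  rw [hlen]
  constructor
  · intro h
    have h' := congrArg String.toList h
    simpa using h'.symm
  · intro h
    rw [← h]
    rfl

-- reference recursion: the blocks still to emit, given the current set and the remaining lines
def pvRef (cur : PySem.Set (List Int)) : List String → List (List (List Int))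
  | [] => [cur]
  | l :: rest =>
    if l = "" then cur :: pvRef PySem.Set.empty rest
    else if PySem.Str.endswith l "map:" = true then pvRef cur rest
    else pvRef (PySem.Set.add cur (pvParseRule l)) rest

-- A's loop computes pvRef
theorem pvFoldA (lines : List String) (ms : List (List (List Int))) (cur : PySem.Set (List Int)) :
    (lines.foldl pvStepA (ms, cur)).1 ++ [(lines.foldl pvStepA (ms, cur)).2]
      = ms ++ pvRef cur lines := by
  induction lines generalizing ms cur with
  | nil => simp [pvRef]
  | cons l rest ih =>
    by_cases h1 : l = ""
    · subst h1
      simp only [List.foldl_cons, pvStepA, if_true]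
      rw [ih]; simp [pvRef]
    · by_cases h2 : PySem.Str.endswith l "map:" = true
      · have h2' : PySem.Str.slice l (some (-4)) none = "map:" := (pvSliceCond l).mpr h2
        simp only [List.foldl_cons, pvStepA, if_neg h1, if_pos h2']
        rw [ih]; simp only [pvRef]; rw [if_neg h1, if_pos h2]
      · have h2' : ¬ (PySem.Str.slice l (some (-4)) none = "map:") := fun hc => h2 ((pvSliceCond l).mp hc)
        simp only [List.foldl_cons, pvStepA, if_neg h1, if_neg h2']
        rw [ih]; simp only [pvRef]; rw [if_neg h1, if_neg h2]

-- structural equations of pvSplitBlocks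
theorem pvSB_nil : pvSplitBlocks [] = [[]] := by
  unfold pvSplitBlocks; simp

theorem pvSB_blank (rest : List String) : pvSplitBlocks ("" :: rest) = [] :: pvSplitBlocks rest := by
  conv_lhs => rw [pvSplitBlocks]
  rw [PySem.List.index?_cons_self]
  simp

theorem pvSB_cons (l : String) (rest : List String) (h : l ≠ "") :
    pvSplitBlocks (l :: rest)
      = (l :: (pvSplitBlocks rest).headI) :: (pvSplitBlocks rest).tail := by
  conv_lhs => rw [pvSplitBlocks]
  rw [PySem.List.index?_cons_of_ne rest h]
  cases hj : PySem.List.index? rest "" with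
  | none =>
    conv_rhs => rw [pvSplitBlocks, hj]
    simp
  | some j =>
    conv_rhs => rw [pvSplitBlocks, hj]
    simp

theorem pvSB_ne_nil (lines : List String) : pvSplitBlocks lines ≠ [] := by
  rw [pvSplitBlocks]
  cases h : PySem.List.index? lines "" <;> simp

-- pvRef with a seed: the seed updated by the first block's rules, then the remaining blocks
theorem pvRefB (lines : List String) (cur : PySem.Set (List Int)) :
    pvRef cur lines
      = PySem.Set.update cur (pvRules (pvSplitBlocks lines).headI)
          :: ((pvSplitBlocks lines).tail).map pvParseBlock := by
  induction lines generalizing cur with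
  | nil =>
    rw [pvSB_nil]
    simp [pvRef, pvRules]
  | cons l rest ih =>
    by_cases h1 : l = ""
    · subst h1
      rw [pvSB_blank]
      obtain ⟨b, bs, hb⟩ := List.exists_cons_of_ne_nil (pvSB_ne_nil rest)
      simp only [pvRef, if_true, List.headI_cons, List.tail_cons]
      rw [ih PySem.Set.empty, hb]
      simp only [List.headI_cons, List.tail_cons, List.map_cons, pvParseBlock]
      rw [PySem.Set.update_empty, pvRules]
      simp [pvRules]
    · rw [pvSB_cons l rest h1]
      simp only [List.headI_cons, List.tail_cons]
      by_cases h2 : PySem.Str.endswith l "map:" = true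
      · have hr : pvRules (l :: (pvSplitBlocks rest).headI) = pvRules (pvSplitBlocks rest).headI := by
          simp only [pvRules, List.filter_cons, h2, Bool.not_true, Bool.false_eq_true, if_false]
        rw [hr]
        simp only [pvRef]; rw [if_neg h1, if_pos h2]
        exact ih cur
      · have hr : pvRules (l :: (pvSplitBlocks rest).headI)
            = pvParseRule l :: pvRules (pvSplitBlocks rest).headI := by
          have h2f : PySem.Str.endswith l "map:" = false := by
            rwa [Bool.not_eq_true] at h2
          simp only [pvRules, List.filter_cons, h2f, Bool.not_false, if_true, List.map_cons]
        rw [hr, PySem.Set.update_cons]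
        simp only [pvRef]; rw [if_neg h1, if_neg h2]
        exact ih (PySem.Set.add cur (pvParseRule l))

-- ===== VERDICT (by name: the statement is the Claim_ definition above) =====
theorem generate_maps_spec : Claim_equal_generate_maps := by
  intro almanac _ _
  unfold Spec_generate_maps generate_maps generate_maps_alt
  have h := pvFoldA (PySem.List.slice almanac (some 2) none) [] PySem.Set.empty
  rw [List.nil_append] at h
  simp only []
  rw [h, pvRefB]
  obtain ⟨b, bs, hb⟩ := List.exists_cons_of_ne_nil (pvSB_ne_nil (PySem.List.slice almanac (some 2) none))
  rw [hb]
  simp only [List.headI_cons, List.tail_cons, List.map_cons, pvParseBlock]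
  rw [PySem.Set.update_empty]
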